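-- pv_equiv track=rewrite | github.com/progjs/coding_test | programmers/월간코드챌린지/10_4.py | solution
-- ===== SOURCE A (Python) =====
-- def solution(s):
--     answer = 0
--     chk, t = True, s[0]
--     for x in s:
--         if t != x:
--             chk = False
--             break
--     else:
--         return answer
--
--     for i in range(len(s)):
--         for j in range(i+1, len(s)):
--             start, end = i, j
--             ans1, ans2 = 0,0
--             while start < end:
--                 if s[start] != s[end]:
--                     ans1 = end-start
--                     break
--                 end -= 1
--
--             start, end = i, j
--             while start < end:
--                 if s[start] != s[end]:
--                     ans2 = end-start
--                     break
--                 start += 1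
--             answer += ans1 if ans1 > ans2 else ans2
--     return answer
-- ===== SOURCE B (Python) =====
-- def solution(s):
--     n = len(s)
--     answer = 0
--     for i in range(n):
--         # first index > i whose character differs from s[i] (n if none)
--         nd = i + 1
--         while nd < n and s[nd] == s[i]:
--             nd += 1
--         e = -1  # largest index <= j with s[e] != s[i], -1 if none
--         for j in range(i + 1, n):
--             if s[j] != s[i]:
--                 answer += j - i
--                 e = j
--             else:
--                 a1 = e - i if e > i else 0
--                 a2 = j - nd if nd < j else 0
--                 answer += a1 if a1 > a2 else a2
--     return answer
-- ===== Notes on version B (the rewrite author's own statement) =====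
-- stated objective: faster
-- what changed: A rescans the substring with two inner while-loops for every pair (i,j) (O(n^3)); B replaces both scans by O(1) state per pair: a running last-mismatch index maintained along j and a once-per-i next-mismatch index, giving one O(n^2) double loop.
import Mathlib
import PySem

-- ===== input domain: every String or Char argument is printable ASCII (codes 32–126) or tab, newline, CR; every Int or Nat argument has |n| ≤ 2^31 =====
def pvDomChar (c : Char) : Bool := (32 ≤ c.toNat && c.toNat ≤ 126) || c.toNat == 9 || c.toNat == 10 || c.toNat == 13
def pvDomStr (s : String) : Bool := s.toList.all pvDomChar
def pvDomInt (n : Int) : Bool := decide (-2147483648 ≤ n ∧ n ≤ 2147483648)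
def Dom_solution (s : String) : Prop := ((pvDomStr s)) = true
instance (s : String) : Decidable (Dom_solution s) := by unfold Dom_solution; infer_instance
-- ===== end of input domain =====

-- B replaces A's two per-pair inner while-loops by a running last-mismatch index and a
-- once-per-i next-mismatch index (objective: faster, O(n^2) instead of O(n^3)).
-- All string indexing in both programs is in range, so s[k] is ported as cs.getD k ' ' (exact there).

-- ===== PORT A =====
-- first inner while-loop: end walks down from j while s[start] == s[end]
def findAns1 (cs : List Char) (i : Nat) : Nat → Int
  | e =>
    if i < e then
      (if cs.getD i ' ' ≠ cs.getD e ' ' then (e : Int) - (i : Int) else findAns1 cs i (e - 1))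
    else 0
  termination_by e => e
  decreasing_by omega

-- second inner while-loop: start walks up from i while s[start] == s[end]
def findAns2 (cs : List Char) (j : Nat) : Nat → Int
  | st =>
    if st < j then
      (if cs.getD st ' ' ≠ cs.getD j ' ' then (j : Int) - (st : Int) else findAns2 cs j (st + 1))
    else 0
  termination_by st => j - st
  decreasing_by omega

def solution (s : String) : Int :=
  let cs := s.toList
  let t := cs.headD ' '  -- s[0]; the empty string (IndexError) is excluded by Pre_solution
  if cs.all (fun x => x == t) then 0  -- the for/else loop: return 0 unless some char differs
  else
    (List.range cs.length).foldl (fun acc i =>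
      (List.range' (i + 1) (cs.length - (i + 1))).foldl (fun acc j =>
        let ans1 := findAns1 cs i j
        let ans2 := findAns2 cs j i
        acc + (if ans1 > ans2 then ans1 else ans2)) acc) 0

-- ===== PORT B =====
-- the while-loop computing nd: first index ≥ k with s[index] ≠ c (or n)
def ndLoop (cs : List Char) (c : Char) (n : Nat) : Nat → Nat
  | k => if k < n then (if cs.getD k ' ' = c then ndLoop cs c n (k + 1) else k) else n
  termination_by k => n - k
  decreasing_by omega

def solution_alt (s : String) : Int :=
  let cs := s.toList
  let n := cs.length
  (List.range n).foldl (fun answer i =>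
    let nd := ndLoop cs (cs.getD i ' ') n (i + 1)
    ((List.range' (i + 1) (n - (i + 1))).foldl (fun (p : Int × Int) j =>
        if cs.getD j ' ' ≠ cs.getD i ' ' then (p.1 + ((j : Int) - (i : Int)), (j : Int))
        else
          let a1 := if p.2 > (i : Int) then p.2 - (i : Int) else 0
          let a2 := if nd < j then (j : Int) - (nd : Int) else 0
          (p.1 + (if a1 > a2 then a1 else a2), p.2))
      (answer, -1)).1) 0

-- ===== PRECONDITION & SPEC =====
-- Pre_ excludes only the empty string, on which A raises IndexError at s[0].
def Pre_solution (s : String) : Prop := s ≠ ""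
instance (s : String) : Decidable (Pre_solution s) := by unfold Pre_solution; infer_instance
def pvWitness_solution : String := "ab"

def Spec_solution (s : String) (out : Int) : Prop := out = solution_alt s
instance (s : String) (out : Int) : Decidable (Spec_solution s out) := by unfold Spec_solution; infer_instance

-- ===== CLAIM (what is proved, stated in full; the proofs are below) =====
def Claim_equal_solution : Prop := ∀ (s : String), Dom_solution s → Pre_solution s → Spec_solution s (solution s)

-- ===== LEMMAS AND PROOFS =====

-- spec of the first while-loop: the largest index in (i, j] whose char differs from s[i], or -1
def lastDiffLe (cs : List Char) (i : Nat) : Nat → Int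
  | j =>
    if i < j then
      (if cs.getD i ' ' ≠ cs.getD j ' ' then (j : Int) else lastDiffLe cs i (j - 1))
    else -1
  termination_by j => j
  decreasing_by omega

theorem findAns1_eq (cs : List Char) (i : Nat) : ∀ j,
    findAns1 cs i j =
      (if lastDiffLe cs i j > (i : Int) then lastDiffLe cs i j - (i : Int) else 0) := by
  intro j
  induction j using Nat.strong_induction_on with
  | _ j ih =>
    rw [findAns1, lastDiffLe]
    by_cases hij : i < j
    · simp only [if_pos hij]
      by_cases hne : cs.getD i ' ' ≠ cs.getD j ' '
      · simp only [if_pos hne]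
        have : ((i : Int)) < (j : Int) := by exact_mod_cast hij
        rw [if_pos this]
      · simp only [if_neg hne]
        exact ih (j - 1) (by omega)
    · simp only [if_neg hij]
      have : ¬ ((-1 : Int) > (i : Int)) := by
        have : (0 : Int) ≤ (i : Int) := Int.natCast_nonneg i
        omega
      rw [if_neg this]

theorem ndLoop_ge (cs : List Char) (c : Char) (n : Nat) : ∀ k, k ≤ n → k ≤ ndLoop cs c n k := by
  intro k hkn
  induction hk : n - k using Nat.strong_induction_on generalizing k with
  | _ m ih =>
    rw [ndLoop]
    by_cases h : k < n
    · rw [if_pos h]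
      by_cases he : cs.getD k ' ' = c
      · rw [if_pos he]
        have := ih (n - (k + 1)) (by omega) (k + 1) (by omega) rfl
        omega
      · rw [if_neg he]
    · rw [if_neg h]; omega

-- the second while-loop, started at st ≤ j, is determined by the first mismatch index
theorem findAns2_eq_ndLoop (cs : List Char) (n : Nat) : ∀ j st, st ≤ j → j ≤ n →
    findAns2 cs j st =
      (if ndLoop cs (cs.getD j ' ') n st < j
       then (j : Int) - (ndLoop cs (cs.getD j ' ') n st : Int) else 0) := by
  intro j st hsj hjn
  induction hm : j - st using Nat.strong_induction_on generalizing st with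
  | _ m ih =>
    rw [findAns2]
    by_cases h : st < j
    · rw [if_pos h, ndLoop, if_pos (by omega : st < n)]
      by_cases he : cs.getD st ' ' = cs.getD j ' '
      · rw [if_neg (by simpa using he), if_pos he]
        exact ih (j - (st + 1)) (by omega) (st + 1) (by omega) rfl
      · rw [if_pos he, if_neg he, if_pos h]
    · rw [if_neg h]
      have h1 : st = j := by omega
      subst h1
      rw [ndLoop]
      by_cases h3 : st < n
      · rw [if_pos h3, if_pos rfl]
        have := ndLoop_ge cs (cs.getD st ' ') n (st + 1) (by omega)
        rw [if_neg (by omega)]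
      · rw [if_neg h3, if_neg (by omega)]

-- inner-loop equivalence: B's fold (sum, running last-mismatch e) against A's fold
theorem inner_eq (cs : List Char) (n : Nat) (i : Nat) (hn : n = cs.length) :
    ∀ (len st : Nat) (acc e : Int), i < st → st + len ≤ n → e = lastDiffLe cs i (st - 1) →
    ((List.range' st len).foldl (fun (p : Int × Int) j =>
        if cs.getD j ' ' ≠ cs.getD i ' ' then (p.1 + ((j : Int) - (i : Int)), (j : Int))
        else
          let a1 := if p.2 > (i : Int) then p.2 - (i : Int) else 0
          let a2 := if ndLoop cs (cs.getD i ' ') n (i + 1) < j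
                    then (j : Int) - (ndLoop cs (cs.getD i ' ') n (i + 1) : Int) else 0
          (p.1 + (if a1 > a2 then a1 else a2), p.2)) (acc, e)).1
    = (List.range' st len).foldl (fun acc j =>
        let ans1 := findAns1 cs i j
        let ans2 := findAns2 cs j i
        acc + (if ans1 > ans2 then ans1 else ans2)) acc := by
  intro len
  induction len with
  | zero => intro st acc e _ _ _; simp
  | succ m ih =>
    intro st acc e hist hlen he
    rw [List.range'_succ, List.foldl_cons, List.foldl_cons]
    by_cases hc : cs.getD st ' ' ≠ cs.getD i ' '
    · -- mismatch at j = st : A's both loops stop at the first check, each giving st - i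
      have ha1 : findAns1 cs i st = (st : Int) - (i : Int) := by
        rw [findAns1, if_pos hist, if_pos (fun h => hc h.symm)]
      have ha2 : findAns2 cs st i = (st : Int) - (i : Int) := by
        rw [findAns2, if_pos hist, if_pos (fun h => hc h.symm)]
      simp only [if_pos hc, ha1, ha2, gt_iff_lt, lt_irrefl, ite_self]
      apply ih _ _ _ (by omega) (by omega)
      simp only [Nat.add_sub_cancel]
      rw [lastDiffLe, if_pos hist, if_pos (fun h => hc h.symm)]
    · -- equal at j = st : A's loops skip the endpoints; use e and nd
      rw [not_not] at hc
      have hlde : lastDiffLe cs i st = e := by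
        rw [lastDiffLe, if_pos hist, if_neg (fun h => h hc.symm)]
        exact he.symm
      have ha1 : findAns1 cs i st = (if e > (i : Int) then e - (i : Int) else 0) := by
        rw [findAns1_eq, hlde]
      have ha2 : findAns2 cs st i =
          (if ndLoop cs (cs.getD i ' ') n (i + 1) < st
           then (st : Int) - (ndLoop cs (cs.getD i ' ') n (i + 1) : Int) else 0) := by
        rw [findAns2, if_pos hist, if_neg (fun h => h hc.symm)]
        rw [findAns2_eq_ndLoop cs n st (i + 1) (by omega) (by omega), hc]
      simp only [if_neg (show ¬ (cs.getD st ' ' ≠ cs.getD i ' ') from fun h => h hc), ha1, ha2]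
      apply ih _ _ _ (by omega) (by omega)
      simp only [Nat.add_sub_cancel]
      rw [lastDiffLe, if_pos hist, if_neg (fun h => h hc.symm), he]

-- the double sums of A and of B are equal on every string
theorem sums_eq (cs : List Char) :
    ((List.range cs.length).foldl (fun answer i =>
      let nd := ndLoop cs (cs.getD i ' ') cs.length (i + 1)
      ((List.range' (i + 1) (cs.length - (i + 1))).foldl (fun (p : Int × Int) j =>
          if cs.getD j ' ' ≠ cs.getD i ' ' then (p.1 + ((j : Int) - (i : Int)), (j : Int))
          else
            let a1 := if p.2 > (i : Int) then p.2 - (i : Int) else 0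
            let a2 := if nd < j then (j : Int) - (nd : Int) else 0
            (p.1 + (if a1 > a2 then a1 else a2), p.2))
        (answer, -1)).1) 0)
    = (List.range cs.length).foldl (fun acc i =>
      (List.range' (i + 1) (cs.length - (i + 1))).foldl (fun acc j =>
        let ans1 := findAns1 cs i j
        let ans2 := findAns2 cs j i
        acc + (if ans1 > ans2 then ans1 else ans2)) acc) 0 := by
  apply PySem.List.foldl_congr_mem
  intro a i hi
  have hin : i < cs.length := List.mem_range.mp hi
  have := inner_eq cs cs.length i rfl (cs.length - (i + 1)) (i + 1) a (-1)
    (by omega) (by omega) ?_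
  · exact this
  · rw [lastDiffLe]
    simp

-- when every character equals the first one, A's inner loops never find a mismatch
theorem findAns1_allEq (cs : List Char) (t : Char) (ht : ∀ k, k < cs.length → cs.getD k ' ' = t)
    (i : Nat) (hi : i < cs.length) : ∀ j, j < cs.length → findAns1 cs i j = 0 := by
  intro j
  induction j using Nat.strong_induction_on with
  | _ j ih =>
    intro hj
    rw [findAns1]
    by_cases h : i < j
    · rw [if_pos h, if_neg (by rw [ht i hi, ht j hj]; simp)]
      exact ih (j - 1) (by omega) (by omega)
    · rw [if_neg h]

theorem findAns2_allEq (cs : List Char) (t : Char) (ht : ∀ k, k < cs.length → cs.getD k ' ' = t)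
    (j : Nat) (hj : j < cs.length) : ∀ st, findAns2 cs j st = 0 := by
  intro st
  induction hm : j - st using Nat.strong_induction_on generalizing st with
  | _ m ih =>
    rw [findAns2]
    by_cases h : st < j
    · rw [if_pos h, if_neg (by rw [ht st (by omega), ht j hj]; simp)]
      exact ih (j - (st + 1)) (by omega) (st + 1) rfl
    · rw [if_neg h]

theorem foldl_fixed_int {α : Type} (l : List α) (a : Int) :
    l.foldl (fun a (_ : α) => a) a = a := by
  induction l generalizing a with
  | nil => rfl
  | cons x xs ih => simp only [List.foldl_cons]; exact ih a

theorem sumA_allEq (cs : List Char) (t : Char) (ht : ∀ k, k < cs.length → cs.getD k ' ' = t) :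
    (List.range cs.length).foldl (fun acc i =>
      (List.range' (i + 1) (cs.length - (i + 1))).foldl (fun acc j =>
        let ans1 := findAns1 cs i j
        let ans2 := findAns2 cs j i
        acc + (if ans1 > ans2 then ans1 else ans2)) acc) 0 = 0 := by
  have h1 : ∀ (a : Int) (i : Nat), i ∈ List.range cs.length →
      (List.range' (i + 1) (cs.length - (i + 1))).foldl (fun acc j =>
        let ans1 := findAns1 cs i j
        let ans2 := findAns2 cs j i
        acc + (if ans1 > ans2 then ans1 else ans2)) a = a := by
    intro a i hi
    have hin : i < cs.length := List.mem_range.mp hi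
    have h2 : (List.range' (i + 1) (cs.length - (i + 1))).foldl (fun acc j =>
        let ans1 := findAns1 cs i j
        let ans2 := findAns2 cs j i
        acc + (if ans1 > ans2 then ans1 else ans2)) a
        = (List.range' (i + 1) (cs.length - (i + 1))).foldl (fun acc (_ : Nat) => acc) a := by
      apply PySem.List.foldl_congr_mem
      intro b j hj
      have hjn : j < cs.length := by
        have := List.mem_range'_1.mp hj
        omega
      simp only [findAns1_allEq cs t ht i hin j hjn,
        findAns2_allEq cs t ht j hjn i]
      simp
    rw [h2, foldl_fixed_int]
  exact (PySem.List.foldl_congr_mem _ _ (fun acc (_ : Nat) => acc) 0 h1).trans (foldl_fixed_int _ 0)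

-- all-equal test of A restated as the hypothesis the zero lemmas need
theorem all_head_getD (cs : List Char) (h : cs.all (fun x => x == cs.headD ' ') = true) :
    ∀ k, k < cs.length → cs.getD k ' ' = cs.headD ' ' := by
  intro k hk
  have h1 : cs.getD k ' ' = cs[k] := List.getD_eq_getElem cs ' ' hk
  have h2 := List.all_eq_true.mp h cs[k] (List.getElem_mem hk)
  rw [h1]
  simpa using h2

-- ===== VERDICT (by name: the statement is the Claim_ definition above) =====
theorem solution_spec : Claim_equal_solution := by
  intro s _ _
  unfold Spec_solution
  show solution s = solution_alt s
  simp only [solution, solution_alt]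
  by_cases h : s.toList.all (fun x => x == s.toList.headD ' ') = true
  · rw [if_pos h, sums_eq s.toList, sumA_allEq s.toList (s.toList.headD ' ') (all_head_getD _ h)]
  · rw [if_neg h]
    exact (sums_eq s.toList).symm
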